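-- pv_equiv track=rewrite | github.com/Flakes139/PL2025-A104527 | TPC2/solucao.py | titulos_por_periodo
-- ===== SOURCE A (Python) =====
-- def titulos_por_periodo(obras):
--     """
--     Agrupa os títulos das obras por período e retorna um dicionário onde
--     as chaves são os períodos e os valores são listas ordenadas de títulos
--     """
--     titulos_por_periodo = {}
--     for obra in obras:
--         if 'periodo' in obra and 'nome' in obra:
--             periodo = obra['periodo']
--             titulo = obra['nome']
--
--             if periodo not in titulos_por_periodo:
--                 titulos_por_periodo[periodo] = []
--
--             titulos_por_periodo[periodo].append(titulo)
--
--     # Ordenar os títulos dentro de cada período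
--     for periodo in titulos_por_periodo:
--         titulos_por_periodo[periodo].sort()
--
--     return titulos_por_periodo
-- ===== SOURCE B (Python) =====
-- def titulos_por_periodo(obras):
--     pares = [(o['periodo'], o['nome']) for o in obras if 'periodo' in o and 'nome' in o]
--     periodos = list(dict.fromkeys(p for p, _ in pares))
--     return {p: sorted(t for q, t in pares if q == p) for p in periodos}
-- ===== Notes on version B (the rewrite author's own statement) =====
-- stated objective: simpler
-- what changed: A builds the groups by mutating a dict while iterating obras and then runs a second in-place sorting loop over its keys; B collects the valid (periodo, nome) pairs once and builds the result directly as a dict comprehension whose value for each first-appearance period is sorted() of a filtering comprehension.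
import Mathlib
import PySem

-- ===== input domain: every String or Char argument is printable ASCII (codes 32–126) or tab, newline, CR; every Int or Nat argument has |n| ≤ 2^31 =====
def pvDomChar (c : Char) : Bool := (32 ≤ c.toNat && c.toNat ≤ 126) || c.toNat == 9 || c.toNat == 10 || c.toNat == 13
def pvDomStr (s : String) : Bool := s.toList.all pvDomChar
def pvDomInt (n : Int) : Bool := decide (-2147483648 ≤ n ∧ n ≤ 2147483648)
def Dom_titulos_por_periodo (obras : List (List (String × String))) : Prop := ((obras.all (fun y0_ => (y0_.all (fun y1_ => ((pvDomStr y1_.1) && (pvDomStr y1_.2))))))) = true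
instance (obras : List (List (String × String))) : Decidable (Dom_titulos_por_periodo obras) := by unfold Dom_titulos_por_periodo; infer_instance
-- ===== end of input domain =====

-- B restates A's "group in a dict, then sort each bucket" as "collect the valid (periodo, nome)
-- pairs once, then build each group's sorted title list by a comprehension over those pairs"
-- (objective: simpler — no incremental dict mutation, no second in-place sorting loop).

-- shared Python dict access: obra['periodo'], obra['nome'] guarded by key membership
-- (dict parameter = association list, lookup = first match)
def pvExtract (obra : List (String × String)) : Option (String × String) :=
  match (PySem.Dict.mk obra).get? "periodo", (PySem.Dict.mk obra).get? "nome" with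
  | some p, some t => some (p, t)
  | _, _ => none

-- ===== PORT A =====
def titulos_por_periodo (obras : List (List (String × String))) : List (String × List String) :=
  let d := obras.foldl (fun d obra =>
    match pvExtract obra with
    | some (p, t) =>
        let d1 := if d.contains p then d else d.insert p ([] : List String)
        d1.modify p [] (fun l => l ++ [t])
    | none => d) PySem.Dict.empty
  let d2 := d.keys.foldl
    (fun d2 p => d2.modify p [] (fun l => PySem.List.sorted l (fun x => x) false)) d
  d2.items

-- ===== PORT B =====
def titulos_por_periodo_alt (obras : List (List (String × String))) : List (String × List String) :=
  let pares := obras.filterMap pvExtract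
  let periodos := PySem.List.dedup (pares.map Prod.fst)
  periodos.map (fun p =>
    (p, PySem.List.sorted ((pares.filter (fun qt => qt.1 == p)).map Prod.snd) (fun x => x) false))

-- ===== PRECONDITION & SPEC =====
def Spec_titulos_por_periodo (obras : List (List (String × String))) (out : List (String × List String)) : Prop := out = titulos_por_periodo_alt obras
instance (obras : List (List (String × String))) (out : List (String × List String)) : Decidable (Spec_titulos_por_periodo obras out) := by unfold Spec_titulos_por_periodo; infer_instance

-- ===== CLAIM (what is proved, stated in full; the proofs are below) =====
def Claim_equal_titulos_por_periodo : Prop := ∀ (obras : List (List (String × String))), Dom_titulos_por_periodo obras → Spec_titulos_por_periodo obras (titulos_por_periodo obras)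

-- ===== LEMMAS AND PROOFS =====

-- A's per-obra step (insert [] if absent, then append) is exactly Dict.modify with default []
theorem pvStep_eq (d : PySem.Dict String (List String)) (p t : String) :
    (if d.contains p then d else d.insert p ([] : List String)).modify p [] (fun l => l ++ [t])
      = d.modify p [] (fun l => l ++ [t]) := by
  by_cases h : d.contains p = true
  · simp [h]
  · simp only [h, Bool.false_eq_true, if_false]
    simp [PySem.Dict.modify, PySem.Dict.getD_insert_self,
      PySem.Dict.getD_of_not_contains _ _ (by simpa using h),
      PySem.Dict.insert_insert_self]

-- A's grouping loop over obras is the modify-fold over the extracted (periodo, nome) pairs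
theorem pvFold_norm (obras : List (List (String × String)))
    (init : PySem.Dict String (List String)) :
    obras.foldl (fun d obra =>
        match pvExtract obra with
        | some (p, t) =>
            let d1 := if d.contains p then d else d.insert p ([] : List String)
            d1.modify p [] (fun l => l ++ [t])
        | none => d) init
      = (obras.filterMap pvExtract).foldl
          (fun d pt => d.modify pt.1 [] (fun l => l ++ [pt.2])) init := by
  induction obras generalizing init with
  | nil => rfl
  | cons o os ih =>
    cases h : pvExtract o with
    | none => simp only [List.foldl_cons, List.filterMap_cons, h]; exact ih init
    | some pt =>
      obtain ⟨p, t⟩ := pt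
      simp only [List.foldl_cons, List.filterMap_cons, h]
      rw [← ih, pvStep_eq init p t]

-- updating a set with elements it already has leaves it unchanged
theorem pvSet_update_self (l s : List String) (h : ∀ x ∈ l, x ∈ s) :
    PySem.Set.update s l = s := by
  induction l generalizing s with
  | nil => rfl
  | cons a l ih =>
    have ha : PySem.Set.contains s a = true := by
      simp [PySem.Set.contains, List.contains_eq_mem]
      exact h a (by simp)
    simp only [PySem.Set.update, List.foldl_cons, PySem.Set.add, ha, if_true]
    exact ih s (fun x hx => h x (by simp [hx]))

-- the value at k after the in-place sorting loop over a duplicate-free key list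
theorem pvGetD_sortfold (f : List String → List String) (ks : List String)
    (d : PySem.Dict String (List String)) (k : String) (hnd : ks.Nodup) :
    (ks.foldl (fun d2 p => d2.modify p [] f) d).getD k []
      = if k ∈ ks then f (d.getD k []) else d.getD k [] := by
  induction ks generalizing d with
  | nil => simp
  | cons a ks ih =>
    have hnd' : ks.Nodup := hnd.of_cons
    rw [List.foldl_cons, ih _ hnd', PySem.Dict.getD_modify]
    by_cases hk : k ∈ ks
    · have hka : k ≠ a := fun he => (List.nodup_cons.mp hnd).1 (he ▸ hk)
      simp [hk, hka]
    · by_cases hke : k = a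
      · subst hke
        simp only [List.mem_cons, true_or, if_pos, if_neg hk]
      · simp [hk, hke]

-- ===== VERDICT (by name: the statement is the Claim_ definition above) =====
theorem titulos_por_periodo_spec : Claim_equal_titulos_por_periodo := by
  intro obras _
  show titulos_por_periodo obras = titulos_por_periodo_alt obras
  set pares := obras.filterMap pvExtract with hpares
  set d : PySem.Dict String (List String) :=
    pares.foldl (fun d pt => d.modify pt.1 [] (fun l => l ++ [pt.2])) PySem.Dict.empty with hd
  set d2 : PySem.Dict String (List String) := d.keys.foldl
    (fun d2 p => d2.modify p [] (fun l => PySem.List.sorted l (fun x => x) false)) d with hd2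
  have hA : titulos_por_periodo obras = d2.items := by
    show ((obras.foldl (fun d obra =>
        match pvExtract obra with
        | some (p, t) =>
            let d1 := if d.contains p then d else d.insert p ([] : List String)
            d1.modify p [] (fun l => l ++ [t])
        | none => d) PySem.Dict.empty).keys.foldl
      (fun d2 p => d2.modify p [] (fun l => PySem.List.sorted l (fun x => x) false))
      (obras.foldl (fun d obra =>
        match pvExtract obra with
        | some (p, t) =>
            let d1 := if d.contains p then d else d.insert p ([] : List String)
            d1.modify p [] (fun l => l ++ [t])
        | none => d) PySem.Dict.empty)).items = d2.items
    rw [pvFold_norm obras PySem.Dict.empty]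
  have hB : titulos_por_periodo_alt obras
      = (PySem.List.dedup (pares.map Prod.fst)).map (fun p =>
          (p, PySem.List.sorted ((pares.filter (fun qt => qt.1 == p)).map Prod.snd)
                (fun x => x) false)) := rfl
  have hkeys : d.keys = PySem.Set.ofList (pares.map Prod.fst) := by
    rw [hd, PySem.Dict.keys_foldl_modify_key pares Prod.fst [] (fun _ pt => (fun l => l ++ [pt.2]))]
    simp [PySem.Set.ofList_eq_foldl, PySem.Set.update, PySem.Dict.keys_empty]
  have hnd : d.keys.Nodup := by
    rw [hkeys]; exact PySem.Set.nodup_ofList _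
  have hgetD : ∀ k, d.getD k [] = (pares.filter (fun qt => qt.1 == k)).map Prod.snd := by
    intro k
    rw [hd, PySem.Dict.getD_foldl_modify_append pares PySem.Dict.empty k]
    simp [PySem.Dict.getD_empty]
  have hk2 : d2.keys = d.keys := by
    rw [hd2, PySem.Dict.keys_foldl_modify d.keys []
      (fun _ _ => (fun l => PySem.List.sorted l (fun x => x) false)) d]
    exact pvSet_update_self _ _ (fun x hx => hx)
  have hnd2 : d2.keys.Nodup := hk2 ▸ hnd
  rw [hA, hB, PySem.Dict.items_eq_map_keys d2 hnd2 [], hk2, hkeys, PySem.List.dedup_eq_ofList]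
  apply List.map_congr_left
  intro k hk
  have hkmem : k ∈ d.keys := by rw [hkeys]; exact hk
  rw [hd2, pvGetD_sortfold _ d.keys d k hnd, if_pos hkmem, hgetD k]
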